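-- pv_equiv track=rewrite | github.com/Alex-mk2/Fundamentos-de-la-programaci-n | clase 05/codigo19.py | traducirALenguajeLadron
-- ===== SOURCE A (Python) =====
-- CONSONANTES = "abcdfghjklmnpqrstvwxyz"
--
-- def traducirALenguajeLadron(texto):
--     #Se crea una variable a traducir
--     traducir = ""
--     #Se crea un iterador
--     i = 0
--     #Mientras no alcance el largo de la palabra
--     while(i < len(texto)):
--         #Se toma cualquier palabra, ya que ira cambiando con el iterador
--         caracter = texto[i]
--         if(caracter in CONSONANTES): #Si esta en la constante consonantes
--             traducir = traducir + caracter + "o" + caracter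
--         else: #Caso que no se encuentre en consonantes
--             traducir = traducir + caracter
--         #Se incrementa iterador
--         i = i + 1
--     return traducir
-- ===== SOURCE B (Python) =====
-- import re
--
-- CONSONANTES = "abcdfghjklmnpqrstvwxyz"
--
-- def traducirALenguajeLadron(texto):
--     return re.sub(r"([abcdfghjklmnpqrstvwxyz])", r"\1o\1", texto)
-- ===== Notes on version B (the rewrite author's own statement) =====
-- stated objective: idiomatic
-- what changed: Replaces the explicit index-driven while loop with a quadratic string accumulator by one regex substitution that doubles exactly the same consonant class around the infix letter in a single pattern-driven pass.
import Mathlib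
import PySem

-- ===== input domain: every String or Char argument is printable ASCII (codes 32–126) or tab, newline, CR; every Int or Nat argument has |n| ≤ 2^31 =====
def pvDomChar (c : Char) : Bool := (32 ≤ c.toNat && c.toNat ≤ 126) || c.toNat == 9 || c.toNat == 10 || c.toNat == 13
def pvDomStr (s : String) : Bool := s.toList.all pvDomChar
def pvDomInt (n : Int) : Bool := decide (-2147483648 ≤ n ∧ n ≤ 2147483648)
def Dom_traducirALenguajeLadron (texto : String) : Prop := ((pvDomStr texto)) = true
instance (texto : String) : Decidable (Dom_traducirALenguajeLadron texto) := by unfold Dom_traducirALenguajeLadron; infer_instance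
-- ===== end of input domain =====

-- ===== PORT A =====
-- B replaces A's index-driven while loop and accumulator with one regex substitution (idiomatic); return values proved equal.
def pvConsonantes : String := "abcdfghjklmnpqrstvwxyz"

-- the while loop of A: index i, accumulator `traducir`; `caracter in CONSONANTES` is Python's substring test
def pvALoop (texto : List Char) (i : Nat) (acc : List Char) : List Char :=
  if h : i < texto.length then
    let caracter := texto[i]
    let acc' := if PySem.Chars.isIn [caracter] pvConsonantes.toList
                then acc ++ [caracter, 'o', caracter]
                else acc ++ [caracter]
    pvALoop texto (i + 1) acc'
  else acc
termination_by texto.length - i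

def traducirALenguajeLadron (texto : String) : String :=
  String.mk (pvALoop texto.toList 0 [])

-- ===== PORT B =====
-- re.sub with a single-character class and backreferences \1o\1: each char of the class
-- is replaced by c,'o',c, every other char kept — exactly this flatMap (exact for this pattern).
def traducirALenguajeLadron_alt (texto : String) : String :=
  String.mk (texto.toList.flatMap (fun c =>
    if pvConsonantes.toList.contains c then [c, 'o', c] else [c]))

-- ===== PRECONDITION & SPEC =====
def Spec_traducirALenguajeLadron (texto : String) (out : String) : Prop := out = traducirALenguajeLadron_alt texto
instance (texto : String) (out : String) : Decidable (Spec_traducirALenguajeLadron texto out) := by unfold Spec_traducirALenguajeLadron; infer_instance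

-- ===== CLAIM (what is proved, stated in full; the proofs are below) =====
def Claim_equal_traducirALenguajeLadron : Prop := ∀ (texto : String), Dom_traducirALenguajeLadron texto → Spec_traducirALenguajeLadron texto (traducirALenguajeLadron texto)

-- ===== LEMMAS AND PROOFS =====

-- the two membership tests agree: a one-character substring test is char membership
theorem pv_isIn_singleton (c : Char) (l : List Char) :
    PySem.Chars.isIn [c] l = l.contains c := by
  by_cases h : c ∈ l
  · obtain ⟨s, t, rfl⟩ := List.append_of_mem h
    have hinf : [c] <:+: s ++ c :: t := ⟨s, t, by simp⟩
    rw [(PySem.Chars.isIn_iff_infix _ _).2 hinf]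
    simp [h]
  · have h1 : PySem.Chars.isIn [c] l = false := by
      rw [PySem.Chars.isIn_eq_false_iff]
      exact fun hi => h (hi.subset (by simp))
    simp [h1, h]

-- loop invariant: pvALoop appends the flatMap of the remaining suffix
theorem pvALoop_eq (texto : List Char) (i : Nat) (acc : List Char) :
    pvALoop texto i acc = acc ++ (texto.drop i).flatMap (fun c =>
      if pvConsonantes.toList.contains c then [c, 'o', c] else [c]) := by
  fun_induction pvALoop texto i acc with
  | case1 i acc h caracter acc' ih =>
    rw [ih, List.drop_eq_getElem_cons h]
    simp only [caracter, acc']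
    simp only [List.flatMap_cons, pv_isIn_singleton]
    split_ifs <;> simp
  | case2 i acc h =>
    rw [List.drop_of_length_le (by omega)]
    simp

-- ===== VERDICT (by name: the statement is the Claim_ definition above) =====
theorem traducirALenguajeLadron_spec : Claim_equal_traducirALenguajeLadron := by
  intro texto _
  unfold Spec_traducirALenguajeLadron traducirALenguajeLadron traducirALenguajeLadron_alt
  rw [pvALoop_eq]
  simp
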